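-- pv_equiv track=rewrite | github.com/DasVinch/adventofcode | y2019/day17.py | find_all_sublists
-- ===== SOURCE A (Python) =====
-- def find_all_sublists(l: list[str]) -> dict[tuple[str,...], int]:
--             if len(l) == 0:
--                 return {}
--
--             if len(l) == 1:
--                 return {tuple(l): 1}
--
--             sub_tail = find_all_sublists(l[1:])
--             for k in range(1,len(l)+1):
--                 tk = tuple(l[:k])
--                 sub_tail[tk] = sub_tail.get(tk, 0) + 1
--
--             return sub_tail
-- ===== SOURCE B (Python) =====
-- def find_all_sublists(l: list[str]) -> dict:
--     counts = {}
--     n = len(l)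
--     for i in range(n - 1, -1, -1):
--         for j in range(i + 1, n + 1):
--             key = tuple(l[i:j])
--             counts[key] = counts.get(key, 0) + 1
--     return counts
-- ===== Notes on version B (the rewrite author's own statement) =====
-- stated objective: simpler
-- what changed: Replaced A's recursion on the tail (with repeated suffix slicing and dict threading through recursive calls) by a single pair of explicit nested index loops (start index descending, end index ascending) incrementing one dict, which also avoids Python's recursion limit on long inputs.
import Mathlib
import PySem

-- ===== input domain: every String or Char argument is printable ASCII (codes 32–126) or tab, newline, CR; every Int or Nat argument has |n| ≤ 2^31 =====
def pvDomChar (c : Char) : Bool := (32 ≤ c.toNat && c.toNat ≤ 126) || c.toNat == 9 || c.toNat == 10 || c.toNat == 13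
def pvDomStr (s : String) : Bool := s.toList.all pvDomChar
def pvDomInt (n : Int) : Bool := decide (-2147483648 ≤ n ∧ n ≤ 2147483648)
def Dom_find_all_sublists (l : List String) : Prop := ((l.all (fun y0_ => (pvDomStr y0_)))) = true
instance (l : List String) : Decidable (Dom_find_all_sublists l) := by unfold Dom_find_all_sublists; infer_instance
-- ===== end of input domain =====

-- B replaces A's tail recursion + suffix slicing by two explicit nested index loops over one dict (simpler, no recursion).

-- ===== PORT A =====
-- recursive helper returning the dict; find_all_sublists returns its items (the association list)
def findA (l : List String) : PySem.Dict (List String) Int :=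
  if l.length = 0 then PySem.Dict.empty
  else if l.length = 1 then PySem.Dict.ofList [(l, 1)]
  else
    let sub_tail := findA (PySem.List.slice l (some 1) none)
    (PySem.List.pyRange 1 ((l.length : Int) + 1) 1).foldl
      (fun d k =>
        let tk := PySem.List.slice l none (some k)
        d.insert tk (d.getD tk 0 + 1)) sub_tail
termination_by l.length
decreasing_by
  simp only [PySem.List.slice_from_one]
  cases l with
  | nil => simp_all
  | cons x t => simp

def find_all_sublists (l : List String) : List (List String × Int) :=
  (findA l).items

-- ===== PORT B =====
def findB (l : List String) : PySem.Dict (List String) Int :=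
  (PySem.List.pyRange ((l.length : Int) - 1) (-1) (-1)).foldl
    (fun d i =>
      (PySem.List.pyRange (i + 1) ((l.length : Int) + 1) 1).foldl
        (fun d j =>
          let key := PySem.List.slice l (some i) (some j)
          d.insert key (d.getD key 0 + 1)) d)
    PySem.Dict.empty

def find_all_sublists_alt (l : List String) : List (List String × Int) :=
  (findB l).items

-- ===== PRECONDITION & SPEC =====
def Spec_find_all_sublists (l : List String) (out : List (List String × Int)) : Prop := out = find_all_sublists_alt l
instance (l : List String) (out : List (List String × Int)) : Decidable (Spec_find_all_sublists l out) := by unfold Spec_find_all_sublists; infer_instance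

-- ===== CLAIM (what is proved, stated in full; the proofs are below) =====
def Claim_equal_find_all_sublists : Prop := ∀ (l : List String), Dom_find_all_sublists l → Spec_find_all_sublists l (find_all_sublists l)

-- ===== LEMMAS AND PROOFS =====

-- the common step: insert-with-count of one key
def ins (d : PySem.Dict (List String) Int) (key : List String) : PySem.Dict (List String) Int :=
  d.insert key (d.getD key 0 + 1)

-- adding all nonempty prefixes of s, shortest first
def addPrefixes (s : List String) (d : PySem.Dict (List String) Int) : PySem.Dict (List String) Int :=
  (List.range s.length).foldl (fun d k => ins d (s.take (k + 1))) d

-- canonical recursion both programs compute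
def canon : List String → PySem.Dict (List String) Int
  | [] => PySem.Dict.empty
  | x :: t => addPrefixes (x :: t) (canon t)

-- A's prefix loop (range(1, len+1) over slices l[:k]) IS addPrefixes l
theorem prefixFold_eq_addPrefixes (l : List String) (d : PySem.Dict (List String) Int) :
    (PySem.List.pyRange 1 ((l.length : Int) + 1) 1).foldl
      (fun d k =>
        let tk := PySem.List.slice l none (some k)
        d.insert tk (d.getD tk 0 + 1)) d = addPrefixes l d := by
  rw [PySem.List.pyRange_one, List.foldl_map]
  have h1 : (((l.length : Int) + 1) - 1).toNat = l.length := by omega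
  rw [h1]
  unfold addPrefixes ins
  apply PySem.List.foldl_congr_mem
  intro acc k _
  have hs : PySem.List.slice l none (some (1 + (k : Int))) = l.take (k + 1) := by
    rw [PySem.List.slice_to l (by positivity)]
    congr 1
    omega
  simp [hs]

-- B's inner loop (range(i+1, len+1) over slices l[i:j]) IS addPrefixes (l.drop i)
theorem innerFold_eq_addPrefixes (l : List String) (d : PySem.Dict (List String) Int)
    (i : Nat) :
    (PySem.List.pyRange ((i : Int) + 1) ((l.length : Int) + 1) 1).foldl
      (fun d j =>
        let key := PySem.List.slice l (some (i : Int)) (some j)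
        d.insert key (d.getD key 0 + 1)) d = addPrefixes (l.drop i) d := by
  rw [PySem.List.pyRange_one, List.foldl_map]
  have h1 : (((l.length : Int) + 1) - ((i : Int) + 1)).toNat = (l.drop i).length := by
    simp
  rw [h1]
  unfold addPrefixes ins
  apply PySem.List.foldl_congr_mem
  intro acc k _
  have hcast : (i : Int) + 1 + (k : Int) = ((i + 1 + k : Nat) : Int) := by push_cast; ring
  have hs : PySem.List.slice l (some (i : Int)) (some ((i : Int) + 1 + (k : Int)))
      = (l.drop i).take (k + 1) := by
    rw [hcast, PySem.List.slice_natCast]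
    congr 1
    omega
  simp [hs]

theorem findA_eq_canon : ∀ l : List String, findA l = canon l := by
  intro l
  induction l with
  | nil => rw [findA]; simp [canon]
  | cons x t ih =>
    rw [findA]
    by_cases ht : t = []
    · subst ht
      simp [canon, addPrefixes, ins, List.range_succ, PySem.Dict.ofList, PySem.Dict.update]
    · rw [PySem.List.slice_from_one, List.tail_cons, ih]
      split_ifs with h1 h2
      · simp at h1
      · exfalso
        cases t with
        | nil => exact ht rfl
        | cons a s => simp at h2
      · exact prefixFold_eq_addPrefixes (x :: t) (canon t)

-- B's outer countdown loop, rewritten as a fold over Nat indices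
theorem findB_eq_canon : ∀ l : List String, findB l = canon l := by
  have hrep : ∀ l : List String, findB l =
      (List.range l.length).foldl
        (fun d k => addPrefixes (l.drop (l.length - 1 - k)) d) PySem.Dict.empty := by
    intro l
    unfold findB
    rw [PySem.List.pyRange_neg_one]
    have h1 : (((l.length : Int) - 1) - (-1)).toNat = l.length := by omega
    rw [h1, List.foldl_map]
    apply PySem.List.foldl_congr_mem
    intro acc k hk
    have hk' : k < l.length := List.mem_range.mp hk
    have hci : (l.length : Int) - 1 - (k : Int) = ((l.length - 1 - k : Nat) : Int) := by
      omega
    rw [hci]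
    exact innerFold_eq_addPrefixes l acc _
  intro l
  rw [hrep]
  induction l with
  | nil => rfl
  | cons x t ih =>
    rw [List.length_cons, List.range_succ, List.foldl_append]
    have hfirst :
        (List.range t.length).foldl
          (fun d k => addPrefixes ((x :: t).drop (t.length + 1 - 1 - k)) d) PySem.Dict.empty
        = canon t := by
      rw [← ih]
      apply PySem.List.foldl_congr_mem
      intro acc k hk
      have hk' : k < t.length := List.mem_range.mp hk
      have hd : t.length + 1 - 1 - k = (t.length - 1 - k) + 1 := by omega
      rw [hd, List.drop_succ_cons]
    rw [hfirst]
    simp [canon]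

-- ===== VERDICT (by name: the statement is the Claim_ definition above) =====
theorem find_all_sublists_spec : Claim_equal_find_all_sublists := by
  intro l _
  show find_all_sublists l = find_all_sublists_alt l
  simp [find_all_sublists, find_all_sublists_alt, findA_eq_canon, findB_eq_canon]
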